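-- pv_equiv track=rewrite | github.com/Dizgog/UNI_CODE | 3_kursas/Kriptografija/11/11.py | i_teksta
-- ===== SOURCE A (Python) =====
-- def i_teksta(n):
--     A='abcdefghijklmnopqrstuvwxyz'
--     text = ''
--     while n > 0:
--         ind = n % 100
--         ind = ind - 1
--         if (ind >= 0) & (ind < len(A)):
--             text += A[ind]
--             n = (n - ind + 1) // 100
--         else:
--             text += '?'
--             n = (n - ind + 1) // 100
--     return text[::-1]
-- ===== SOURCE B (Python) =====
-- def i_teksta(n):
--     if n <= 0:
--         return ''
--     A = 'abcdefghijklmnopqrstuvwxyz'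
--     s = str(n)
--     if len(s) % 2 == 1:
--         s = '0' + s
--     out = ''
--     while s:
--         r = (ord(s[0]) - 48) * 10 + (ord(s[1]) - 48)
--         out += A[r - 1] if 1 <= r <= 26 else '?'
--         s = s[2:]
--     return out
-- ===== Notes on version B (the rewrite author's own statement) =====
-- stated objective: alternative
-- what changed: B reads the base-100 digits directly off str(n) in two-character groups left to right (padding with one '0' when the decimal length is odd), instead of A's repeated divmod-by-100 loop followed by a final string reversal.
import Mathlib
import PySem

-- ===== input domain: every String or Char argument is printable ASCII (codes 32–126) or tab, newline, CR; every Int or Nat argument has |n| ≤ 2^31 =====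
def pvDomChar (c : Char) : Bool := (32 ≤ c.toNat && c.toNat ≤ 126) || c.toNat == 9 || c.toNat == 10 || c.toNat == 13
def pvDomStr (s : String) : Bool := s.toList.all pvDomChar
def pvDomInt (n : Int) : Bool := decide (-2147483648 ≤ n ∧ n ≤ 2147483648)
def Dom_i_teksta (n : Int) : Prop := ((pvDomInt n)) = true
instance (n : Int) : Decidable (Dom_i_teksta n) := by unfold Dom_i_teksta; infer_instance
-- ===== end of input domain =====

-- B decodes the base-100 digits by reading str(n) in two-character groups left to right
-- (no divmod loop, no final reversal): an alternative decomposition, not claimed faster.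

-- ===== PORT A =====
-- A = 'abcdefghijklmnopqrstuvwxyz'
def pvAbc : List Char := "abcdefghijklmnopqrstuvwxyz".toList

-- while n > 0: ind = n % 100 - 1; append A[ind] or '?'; n = (n - ind + 1) // 100
def i_teksta_loop (n : Int) (text : List Char) : List Char :=
  if h : 0 < n then
    let ind := PySem.Int.mod n 100 - 1
    if 0 ≤ ind ∧ ind < 26 then
      -- A[ind] is guarded in range, so the pyGetD default is never used
      i_teksta_loop (PySem.Int.floordiv (n - ind + 1) 100) (text ++ [PySem.List.pyGetD pvAbc ind '?'])
    else
      i_teksta_loop (PySem.Int.floordiv (n - ind + 1) 100) (text ++ ['?'])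
  else text
termination_by n.toNat
decreasing_by
  all_goals
  · have hmod : PySem.Int.mod n 100 = n % 100 := PySem.Int.mod_eq_emod_of_pos (by norm_num)
    have hdiv : PySem.Int.floordiv (n - (PySem.Int.mod n 100 - 1) + 1) 100
        = (n - n % 100 + 2) / 100 := by
      rw [hmod, PySem.Int.floordiv_eq_ediv_of_pos (by norm_num)]; ring_nf
    rw [hdiv]; omega

def i_teksta (n : Int) : String :=
  -- return text[::-1]   (slice? … (-1) is never none for step -1)
  String.ofList ((PySem.List.slice? (i_teksta_loop n []) none none (-1)).getD [])

-- ===== PORT B =====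
def pvAbcAlt : List Char := "abcdefghijklmnopqrstuvwxyz".toList

-- while s: r = (ord(s[0])-48)*10 + (ord(s[1])-48); out += A[r-1] or '?'; s = s[2:]
-- (the [_] case is unreachable: s always has even length; Python would raise there on s[1])
def i_teksta_altLoop (s : List Char) (out : List Char) : List Char :=
  match s with
  | [] => out
  | [_] => out
  | c1 :: c2 :: rest =>
      let r : Int := ((c1.toNat : Int) - 48) * 10 + ((c2.toNat : Int) - 48)
      i_teksta_altLoop rest
        (out ++ [if 1 ≤ r ∧ r ≤ 26 then PySem.List.pyGetD pvAbcAlt (r - 1) '?' else '?'])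

def i_teksta_alt (n : Int) : String :=
  if n ≤ 0 then "" else
    let s := PySem.Int.toChars n          -- str(n) as its code points
    let s := if s.length % 2 = 1 then '0' :: s else s
    String.ofList (i_teksta_altLoop s [])

-- ===== PRECONDITION & SPEC =====
def Spec_i_teksta (n : Int) (out : String) : Prop := out = i_teksta_alt n
instance (n : Int) (out : String) : Decidable (Spec_i_teksta n out) := by unfold Spec_i_teksta; infer_instance

-- ===== CLAIM (what is proved, stated in full; the proofs are below) =====
def Claim_equal_i_teksta : Prop := ∀ (n : Int), Dom_i_teksta n → Spec_i_teksta n (i_teksta n)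

-- ===== LEMMAS AND PROOFS =====

theorem pvAbc_eq_alt : pvAbcAlt = pvAbc := rfl

-- the character A writes for a base-100 digit d
def chmapN (d : Nat) : Char :=
  if 1 ≤ d ∧ d ≤ 26 then PySem.List.pyGetD pvAbc ((d : Int) - 1) '?' else '?'

-- decimal digit characters of m, most significant first (spec for Nat.toDigits 10)
def dig (m : Nat) : List Char :=
  if h : m < 10 then [Nat.digitChar m]
  else dig (m / 10) ++ [Nat.digitChar (m % 10)]
termination_by m
decreasing_by exact Nat.div_lt_self (by omega) (by norm_num)

-- the character B writes for a two-character group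
def chmapC (c1 c2 : Char) : Char :=
  let r : Int := ((c1.toNat : Int) - 48) * 10 + ((c2.toNat : Int) - 48)
  if 1 ≤ r ∧ r ≤ 26 then PySem.List.pyGetD pvAbcAlt (r - 1) '?' else '?'

-- B's pass over the groups, and the left pad
def pcs : List Char → List Char
  | [] => []
  | [_] => []
  | c1 :: c2 :: rest => chmapC c1 c2 :: pcs rest

def padE (xs : List Char) : List Char :=
  if xs.length % 2 = 1 then '0' :: xs else xs

theorem digitChar_toNat (d : Nat) (hd : d < 10) : (Nat.digitChar d).toNat = 48 + d := by
  interval_cases d <;> decide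

theorem chmapC_digit (a b : Nat) (ha : a < 10) (hb : b < 10) :
    chmapC (Nat.digitChar a) (Nat.digitChar b) = chmapN (10 * a + b) := by
  unfold chmapC chmapN
  rw [digitChar_toNat a ha, digitChar_toNat b hb, pvAbc_eq_alt]
  have hr : ((((48 + a : Nat) : Int) - 48) * 10 + (((48 + b : Nat) : Int) - 48))
      = ((10 * a + b : Nat) : Int) := by push_cast; ring
  rw [hr]
  by_cases hc : 1 ≤ 10 * a + b ∧ 10 * a + b ≤ 26
  · rw [if_pos (by exact_mod_cast hc), if_pos hc]
  · rw [if_neg (by exact_mod_cast hc), if_neg hc]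

theorem toDigitsCore_eq (f : Nat) : ∀ (n : Nat) (acc : List Char), n < f →
    Nat.toDigitsCore 10 f n acc = dig n ++ acc := by
  induction f with
  | zero => intro n acc h; omega
  | succ f ih =>
    intro n acc h
    by_cases h0 : n / 10 = 0
    · have hn : n < 10 := by omega
      simp only [Nat.toDigitsCore, h0, if_pos]
      conv_rhs => rw [dig]
      rw [dif_pos hn, Nat.mod_eq_of_lt hn]
      simp
    · have hn : ¬ n < 10 := by omega
      simp only [Nat.toDigitsCore, h0, if_false]
      rw [ih (n / 10) _ (by omega)]
      conv_rhs => rw [dig]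
      rw [dif_neg hn]
      simp

theorem toDigits_eq (m : Nat) : Nat.toDigits 10 m = dig m := by
  have := toDigitsCore_eq (m + 1) m [] (by omega)
  simpa [Nat.toDigits] using this

theorem dig_step (m : Nat) (h : 100 ≤ m) :
    dig m = dig (m / 100) ++ [Nat.digitChar (m / 10 % 10), Nat.digitChar (m % 10)] := by
  rw [dig, dif_neg (by omega)]
  rw [dig, dif_neg (by omega : ¬ m / 10 < 10)]
  rw [Nat.div_div_eq_div_mul]
  simp

theorem padE_even (xs : List Char) : (padE xs).length % 2 = 0 := by
  unfold padE
  split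
  next h => simp only [List.length_cons]; omega
  next h => omega

theorem padE_append_pair (xs : List Char) (a b : Char) :
    padE (xs ++ [a, b]) = padE xs ++ [a, b] := by
  unfold padE
  have : (xs ++ [a, b]).length % 2 = xs.length % 2 := by
    simp only [List.length_append, List.length_cons, List.length_nil]
    omega
  rw [this]; split <;> simp

theorem pcs_append_pair (ys : List Char) (a b : Char) (h : ys.length % 2 = 0) :
    pcs (ys ++ [a, b]) = pcs ys ++ [chmapC a b] := by
  induction ys using pcs.induct with
  | case1 => simp [pcs]
  | case2 c => simp at h
  | case3 c1 c2 rest ih =>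
    simp only [List.cons_append, pcs, List.length_cons] at *
    rw [ih (by omega)]

theorem pcs_padE_dig (m : Nat) (hm : 1 ≤ m) :
    pcs (padE (dig m)) = ((Nat.digits 100 m).reverse).map chmapN := by
  induction m using Nat.strong_induction_on with
  | _ m ih =>
    have h100 : (1:Nat) < 100 := by norm_num
    by_cases hbig : 100 ≤ m
    · have hq : 1 ≤ m / 100 := Nat.one_le_div_iff (by norm_num) |>.mpr hbig
      rw [dig_step m hbig, padE_append_pair,
        pcs_append_pair _ _ _ (padE_even _),
        ih (m / 100) (Nat.div_lt_self (by omega) (by norm_num)) hq,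
        show Nat.digits 100 m = m % 100 :: Nat.digits 100 (m / 100) from
          Nat.digits_def' h100 (by omega)]
      have : chmapC (Nat.digitChar (m / 10 % 10)) (Nat.digitChar (m % 10))
          = chmapN (m % 100) := by
        rw [chmapC_digit _ _ (Nat.mod_lt _ (by norm_num)) (Nat.mod_lt _ (by norm_num))]
        congr 1; omega
      rw [this]; simp
    · have hdig : Nat.digits 100 m = [m] := by
        rw [Nat.digits_def' h100 (by omega), Nat.mod_eq_of_lt (by omega),
          Nat.div_eq_of_lt (by omega), Nat.digits_zero]
      by_cases h10 : m < 10
      · rw [dig, dif_pos h10]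
        have : padE [Nat.digitChar m] = ['0', Nat.digitChar m] := by
          unfold padE; simp
        rw [this]
        have h0 : ('0' : Char) = Nat.digitChar 0 := by decide
        simp only [pcs, hdig, h0]
        rw [chmapC_digit 0 m (by norm_num) h10]
        simp
      · rw [dig, dif_neg h10, dig, dif_pos (by omega : m / 10 < 10)]
        have : padE ([Nat.digitChar (m / 10)] ++ [Nat.digitChar (m % 10)])
            = [Nat.digitChar (m / 10), Nat.digitChar (m % 10)] := by
          unfold padE; simp
        rw [this]
        simp only [pcs, hdig]
        rw [chmapC_digit _ _ (by omega) (Nat.mod_lt _ (by norm_num))]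
        have : 10 * (m / 10) + m % 10 = m := by omega
        rw [this]
        simp

theorem altLoop_spec (s : List Char) : ∀ out, i_teksta_altLoop s out = out ++ pcs s := by
  induction s using pcs.induct with
  | case1 => intro out; simp [i_teksta_altLoop, pcs]
  | case2 c => intro out; simp [i_teksta_altLoop, pcs]
  | case3 c1 c2 rest ih =>
    intro out
    simp only [i_teksta_altLoop]
    rw [ih]
    simp [pcs, chmapC]

theorem loop_spec (m : Nat) : ∀ text : List Char,
    i_teksta_loop (↑m) text = text ++ (Nat.digits 100 m).map chmapN := by
  induction m using Nat.strong_induction_on with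
  | _ m ih =>
    intro text
    by_cases hm : 0 < m
    · rw [i_teksta_loop, dif_pos (by exact_mod_cast hm)]
      have hmod : PySem.Int.mod (↑m) 100 = ((m % 100 : Nat) : Int) := by
        rw [PySem.Int.mod_eq_emod_of_pos (by norm_num)]; omega
      have harg : ((m:Int) - (PySem.Int.mod (↑m) 100 - 1) + 1)
          = ((m - m % 100 + 2 : Nat) : Int) := by
        rw [hmod]
        have := Nat.mod_le m 100
        omega
      have hnext : PySem.Int.floordiv ((m - m % 100 + 2 : Nat) : Int) 100
          = ((m / 100 : Nat) : Int) := by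
        have h1 : PySem.Int.floordiv ((m - m % 100 + 2 : Nat) : Int) ((100 : Nat) : Int)
            = (((m - m % 100 + 2) / 100 : Nat) : Int) :=
          PySem.Int.floordiv_natCast (m - m % 100 + 2) 100
        have h2 : (m - m % 100 + 2) / 100 = m / 100 := by omega
        rw [h2] at h1; exact_mod_cast h1
      have hdigits : Nat.digits 100 m = m % 100 :: Nat.digits 100 (m / 100) :=
        Nat.digits_def' (by norm_num) hm
      have hrec := ih (m / 100) (Nat.div_lt_self hm (by norm_num))
      by_cases hc : 1 ≤ m % 100 ∧ m % 100 ≤ 26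
      · rw [if_pos (by rw [hmod]; constructor <;> [omega; omega]),
          harg, hnext, hrec, hdigits]
        simp only [List.map_cons, List.append_assoc, List.singleton_append]
        congr 2
        rw [hmod]
        unfold chmapN
        rw [if_pos hc]
      · rw [if_neg (by rw [hmod]; omega), harg, hnext, hrec, hdigits]
        simp only [List.map_cons, List.append_assoc, List.singleton_append]
        congr 2
        unfold chmapN
        rw [if_neg hc]
    · have hm0 : m = 0 := by omega
      subst hm0
      rw [i_teksta_loop, dif_neg (by norm_num)]
      simp

-- ===== VERDICT (by name: the statement is the Claim_ definition above) =====
theorem i_teksta_spec : Claim_equal_i_teksta := by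
  intro n _
  unfold Spec_i_teksta
  by_cases hn : n ≤ 0
  · have hloop : i_teksta_loop n [] = [] := by
      rw [i_teksta_loop, dif_neg (by omega)]
    unfold i_teksta i_teksta_alt
    rw [hloop, if_pos hn]
    simp [PySem.List.slice?_none_none_neg_one]
  · have hm : n = ((n.toNat : Nat) : Int) := by omega
    set m := n.toNat with hmdef
    have hm1 : 1 ≤ m := by omega
    unfold i_teksta i_teksta_alt
    rw [if_neg hn, hm, loop_spec m []]
    rw [PySem.List.slice?_none_none_neg_one]
    have hchars : PySem.Int.toChars ((m : Nat) : Int) = dig m := by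
      unfold PySem.Int.toChars
      rw [if_neg (by omega)]
      have : (((m : Nat) : Int)).toNat = m := by omega
      rw [this, toDigits_eq]
    simp only [hchars]
    have hpad : (if (dig m).length % 2 = 1 then '0' :: dig m else dig m) = padE (dig m) := rfl
    rw [hpad, altLoop_spec (padE (dig m)) [], pcs_padE_dig m hm1]

    simp [List.map_reverse]
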